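-- pv_equiv track=rewrite | github.com/BusinessJoe/OneToNine | dlxsudoku/dlx.py | _make_row_mapping
-- ===== SOURCE A (Python) =====
-- def _make_row_mapping(
--     primary_grid: list[list[bool]], secondary_grid: list[list[bool]] | None
-- ) -> dict[tuple[int], int]:
--     if secondary_grid is not None:
--         grid = [p + s for p, s in zip(primary_grid, secondary_grid)]
--     else:
--         grid = primary_grid
--
--     row_map = dict()
--
--     for row_idx, row in enumerate(grid):
--         key = tuple(i for i, val in enumerate(row) if val)
--         row_map[key] = row_idx
--
--     return row_map
-- ===== SOURCE B (Python) =====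
-- def _make_row_mapping(primary_grid, secondary_grid):
--     if secondary_grid is not None:
--         rows = [p + s for p, s in zip(primary_grid, secondary_grid)]
--     else:
--         rows = primary_grid
--     keys = [[] for _ in rows]
--     width = max((len(row) for row in rows), default=0)
--     for c in range(width):
--         for r, row in enumerate(rows):
--             if c < len(row) and row[c]:
--                 keys[r].append(c)
--     return {tuple(k): r for r, k in enumerate(keys)}
-- ===== Notes on version B (the rewrite author's own statement) =====
-- stated objective: alternative
-- what changed: B traverses the grid column-major: a single sweep over column indices 0..width-1 grows all row keys simultaneously (appending c to key r when cell (r,c) is true), instead of A's row-major per-row enumerate/filter; the dict is then built from the finished key list.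
import Mathlib
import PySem

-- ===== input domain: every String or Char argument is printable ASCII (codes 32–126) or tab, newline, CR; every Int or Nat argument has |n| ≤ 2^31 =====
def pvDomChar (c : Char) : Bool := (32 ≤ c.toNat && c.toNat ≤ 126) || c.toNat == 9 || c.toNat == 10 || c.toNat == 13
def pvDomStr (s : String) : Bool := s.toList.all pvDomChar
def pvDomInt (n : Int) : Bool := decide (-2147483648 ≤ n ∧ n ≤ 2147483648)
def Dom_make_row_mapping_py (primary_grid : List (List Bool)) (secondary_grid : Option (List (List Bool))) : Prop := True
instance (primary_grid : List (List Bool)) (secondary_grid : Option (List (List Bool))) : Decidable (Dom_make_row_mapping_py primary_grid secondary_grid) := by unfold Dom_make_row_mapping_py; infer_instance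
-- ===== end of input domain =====

-- B builds every row's key in one column-major sweep (all keys grow together, column by
-- column) instead of A's row-major per-row index filter (objective: alternative).

-- ===== PORT A =====
-- key = tuple(i for i, val in enumerate(row) if val)
def pvKeyA (row : List Bool) : List Int :=
  ((PySem.List.enumerate row).filter (fun p => p.2)).map (fun p => p.1)

def make_row_mapping_py (primary_grid : List (List Bool)) (secondary_grid : Option (List (List Bool))) : List (List Int × Int) :=
  let grid : List (List Bool) :=
    match secondary_grid with
    | some s => (primary_grid.zip s).map (fun pr => pr.1 ++ pr.2)
    | none => primary_grid
  ((PySem.List.enumerate grid).foldl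
    (fun d pr => d.insert (pvKeyA pr.2) pr.1) PySem.Dict.empty).items

-- ===== PORT B =====
-- inner loop 'for r, row in enumerate(rows): if c < len(row) and row[c]: keys[r].append(c)':
-- each key advances in lockstep with its row; 'c < len(row) and row[c]' (c ≥ 0 from range)
-- is exactly 'pyGet? row c = some true'.
def pvColStep (keys : List (List Int)) (rows : List (List Bool)) (c : Int) : List (List Int) :=
  (keys.zip rows).map (fun kr => if PySem.List.pyGet? kr.2 c = some true then kr.1 ++ [c] else kr.1)

def make_row_mapping_py_alt (primary_grid : List (List Bool)) (secondary_grid : Option (List (List Bool))) : List (List Int × Int) :=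
  let rows : List (List Bool) :=
    match secondary_grid with
    | some s => (primary_grid.zip s).map (fun pr => pr.1 ++ pr.2)
    | none => primary_grid
  -- width = max((len(row) for row in rows), default=0)
  let width : Int := (rows.map (fun r => (r.length : Int))).foldl max 0
  let keys : List (List Int) :=
    (PySem.List.pyRange 0 width 1).foldl (fun ks c => pvColStep ks rows c)
      (rows.map (fun _ => ([] : List Int)))
  ((PySem.List.enumerate keys).foldl
    (fun d pr => d.insert pr.2 pr.1) PySem.Dict.empty).items

-- ===== PRECONDITION & SPEC =====
def Spec_make_row_mapping_py (primary_grid : List (List Bool)) (secondary_grid : Option (List (List Bool))) (out : List (List Int × Int)) : Prop := out = make_row_mapping_py_alt primary_grid secondary_grid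
instance (primary_grid : List (List Bool)) (secondary_grid : Option (List (List Bool))) (out : List (List Int × Int)) : Decidable (Spec_make_row_mapping_py primary_grid secondary_grid out) := by unfold Spec_make_row_mapping_py; infer_instance

-- ===== CLAIM (what is proved, stated in full; the proofs are below) =====
def Claim_equal_make_row_mapping_py : Prop := ∀ (primary_grid : List (List Bool)) (secondary_grid : Option (List (List Bool))), Dom_make_row_mapping_py primary_grid secondary_grid → Spec_make_row_mapping_py primary_grid secondary_grid (make_row_mapping_py primary_grid secondary_grid)

-- ===== LEMMAS AND PROOFS =====

-- row-major key with a starting offset, as a recursion (proof-side bridge only)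
def pvTrueIdx : List Bool → Int → List Int
  | [], _ => []
  | b :: rest, i => if b then i :: pvTrueIdx rest (i + 1) else pvTrueIdx rest (i + 1)

-- Nat analogue of pvTrueIdx
def pvNatIdx : List Bool → Nat → List Nat
  | [], _ => []
  | b :: rest, i => if b then i :: pvNatIdx rest (i + 1) else pvNatIdx rest (i + 1)

theorem pvKeyA_from (row : List Bool) (i : Int) :
    ((PySem.List.enumerate row i).filter (fun p => p.2)).map (fun p => p.1) = pvTrueIdx row i := by
  induction row generalizing i with
  | nil => simp [PySem.List.enumerate_nil, pvTrueIdx]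
  | cons b rest ih =>
    rw [PySem.List.enumerate_cons]
    cases b <;> simp [pvTrueIdx, List.filter, ih]

theorem pvKeyA_eq (row : List Bool) : pvKeyA row = pvTrueIdx row 0 := pvKeyA_from row 0

theorem pvNatIdx_shift (row : List Bool) (n : Nat) :
    pvNatIdx row (n + 1) = (pvNatIdx row n).map Nat.succ := by
  induction row generalizing n with
  | nil => simp [pvNatIdx]
  | cons b rest ih => cases b <;> simp [pvNatIdx, ih]

theorem pvNatIdx_cast (row : List Bool) (n : Nat) :
    (pvNatIdx row n).map (Nat.cast : Nat → Int) = pvTrueIdx row (n : Int) := by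
  induction row generalizing n with
  | nil => simp [pvNatIdx, pvTrueIdx]
  | cons b rest ih =>
    have h := ih (n + 1)
    push_cast at h
    cases b <;> simp [pvNatIdx, pvTrueIdx, h]

-- nat-range filter of the true cells is pvNatIdx, once the range covers the row
theorem pvNatKey (row : List Bool) (W : Nat) (hW : row.length ≤ W) :
    (List.range W).filter (fun i => decide (row[i]? = some true)) = pvNatIdx row 0 := by
  induction row generalizing W with
  | nil => simp [pvNatIdx]
  | cons b rest ih =>
    cases W with
    | zero => simp at hW
    | succ W' =>
      rw [List.range_succ_eq_map, List.filter_cons, List.filter_map]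
      have hc : ((fun i => decide ((b :: rest)[i]? = some true)) ∘ Nat.succ)
          = fun i => decide (rest[i]? = some true) := by
        funext i; simp
      rw [hc, ih W' (by simpa using hW)]
      cases b <;> simp [pvNatIdx, pvNatIdx_shift]

-- the per-row column loop over range(width) yields pvKeyA when width covers the row
theorem pvRowLoop (row : List Bool) (width : Int) (hw : (row.length : Int) ≤ width) :
    (PySem.List.pyRange 0 width 1).foldl
      (fun k c => if PySem.List.pyGet? row c = some true then k ++ [c] else k) []
      = pvKeyA row := by
  rw [PySem.List.foldl_append_ite_eq_filter, PySem.List.pyRange_one, List.filter_map]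
  have hc : ((fun c => decide (PySem.List.pyGet? row c = some true)) ∘ (fun k : Nat => (0 : Int) + k))
      = fun k : Nat => decide (row[k]? = some true) := by
    funext k; simp
  rw [hc, pvNatKey row _ (by omega), pvKeyA_eq]
  have h := pvNatIdx_cast row 0
  simp only [Nat.cast_zero] at h
  rw [← h]
  simp only [List.nil_append]
  apply List.map_congr_left
  intro i _
  simp

-- column step on keys of the form rows.map g
theorem pvColStep_map (rows : List (List Bool)) (g : List Bool → List Int) (c : Int) :
    pvColStep (rows.map g) rows c
      = rows.map (fun r => if PySem.List.pyGet? r c = some true then g r ++ [c] else g r) := by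
  unfold pvColStep
  induction rows with
  | nil => simp
  | cons r rest ih => simpa using ih

-- the whole column sweep computes each row's loop independently
theorem pvSweep (rows : List (List Bool)) (cs : List Int) (g : List Bool → List Int) :
    cs.foldl (fun ks c => pvColStep ks rows c) (rows.map g)
      = rows.map (fun r => cs.foldl
          (fun k c => if PySem.List.pyGet? r c = some true then k ++ [c] else k) (g r)) := by
  induction cs generalizing g with
  | nil => simp
  | cons c rest ih =>
    simp only [List.foldl_cons, pvColStep_map rows g c]
    exact ih _

theorem pvFoldl_max_init_le (l : List Int) (a : Int) : a ≤ l.foldl max a := by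
  induction l generalizing a with
  | nil => simp
  | cons y rest ih => exact le_trans (le_max_left a y) (ih (max a y))

theorem pvLe_foldl_max (l : List Int) (x : Int) (hx : x ∈ l) : ∀ a, x ≤ l.foldl max a := by
  induction l with
  | nil => simp at hx
  | cons y rest ih =>
    intro a
    rcases List.mem_cons.mp hx with h | h
    · subst h
      exact le_trans (le_max_right a x) (pvFoldl_max_init_le rest (max a x))
    · exact ih h (max a y)

theorem pvEnumerate_map {α β : Type} (f : α → β) (xs : List α) (s : Int) :
    PySem.List.enumerate (xs.map f) s = (PySem.List.enumerate xs s).map (fun q => (q.1, f q.2)) := by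
  induction xs generalizing s with
  | nil => simp [PySem.List.enumerate_nil]
  | cons x rest ih => simp [PySem.List.enumerate_cons, ih]

-- B's whole pipeline, for an arbitrary row list, equals A's per-row fold
theorem pvMain (rows : List (List Bool)) :
    ((PySem.List.enumerate
        ((PySem.List.pyRange 0 ((rows.map (fun r => (r.length : Int))).foldl max 0) 1).foldl
          (fun ks c => pvColStep ks rows c) (rows.map (fun _ => ([] : List Int))))).foldl
      (fun d pr => d.insert pr.2 pr.1) PySem.Dict.empty).items
    = ((PySem.List.enumerate rows).foldl
        (fun d pr => d.insert (pvKeyA pr.2) pr.1) PySem.Dict.empty).items := by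
  have hkeys :
      (PySem.List.pyRange 0 ((rows.map (fun r => (r.length : Int))).foldl max 0) 1).foldl
        (fun ks c => pvColStep ks rows c) (rows.map (fun _ => ([] : List Int)))
      = rows.map pvKeyA := by
    rw [pvSweep rows _ (fun _ => ([] : List Int))]
    apply List.map_congr_left
    intro r hr
    exact pvRowLoop r _ (pvLe_foldl_max _ _ (List.mem_map_of_mem hr) 0)
  rw [hkeys, pvEnumerate_map, List.foldl_map]

-- ===== VERDICT (by name: the statement is the Claim_ definition above) =====
theorem make_row_mapping_py_spec : Claim_equal_make_row_mapping_py := by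
  intro pg sg _
  unfold Spec_make_row_mapping_py make_row_mapping_py make_row_mapping_py_alt
  cases sg <;> exact (pvMain _).symm
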